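-- pv_equiv track=rewrite | github.com/maorsarusi/python_pycharm | functional_programming/ex4/targil4_2/targil4_2.py | treatLine
-- ===== SOURCE A (Python) =====
-- def treatLine(lineNr, line):
--     """
--     a function to manage the decomposition of a line in a text
--     :param lineNr: a number to check if we had a number in the line
--     :param line: a line from a text
--     :return: a tuple with lineNr and the dictionary we creates
--     """
--     keys = line.split()
--     vowels = listOfSentence(keys, crateListVByWord)
--     tup = enterToATuple(vowels)
--     consonantbm = listOfSentence(keys, createListbmByWord)
--     tup += enterToATuple(consonantbm)
--     consonantnz = listOfSentence(keys, createListnzByWord)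
--     tup += enterToATuple(consonantnz)
--     values = list(zip(*[item for item in tup]))
--     d = createDic(keys, values, {})
--     return tuple([lineNr]) + (d,)
--
-- def crateListVByWord(word, vowels=['a', 'i', 'e', 'o', 'u']):
--     """
--     a function to return all vowels in a word
--     :param word: the word
--     :param vowels: all vowels in english
--     :return: a list with all vowels in the word
--     """
--     return [i for i in word if i.lower() in vowels]
--
-- def listOfSentence(line, func):
--     """
--     a function to create a list by a function
--     :param line: the parameter we use
--     :param func:  the function we use
--     :return: a list by the function and the parameter
--     """
--     if len(line) == 0:
--         return []
--     return listOfSentence(line[:-1], func) + [func(line[-1])]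
--
-- def createListbmByWord(word, vowels=['a', 'i', 'e', 'o', 'u']):
--     """
--     as function to return all the letters between a-m that don't a vowels
--     :param word: the word
--     :param vowels: a list with all vowels in english
--     :return: a list with all letters between a-m that don't vowels
--     """
--     return [i for i in word if
--             'm' >= i.lower() >= 'a' and i.lower() not in vowels]
--
-- def enterToATuple(L, x=[]):
--     """
--     a function to insert  a list to a tuple
--     :param L: the list to insert
--     :param x: a helper list
--     :return: the tuple
--     """
--     return tuple([L] + x)
--
-- def createListnzByWord(word, vowels=['a', 'i', 'e', 'o', 'u']):
--     """
--     as function to return all the letters between n-z that don't a vowels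
--     :param word: the word
--     :param vowels: a list with all vowels in english
--     :return: a list with all letters between n-z that don't vowels
--     """
--     return list([i for i in word if
--                  'z' >= i.lower() >= 'n' and i.lower() not in vowels])
--
-- def createDic(keys, values, dic):
--     """
--     a function to create a dictionary
--     :param keys: the keys for the dictionary
--     :param values: the values for the dictionary
--     :param dic: the dic we insert into
--     :return: dic
--     """
--     if len(keys) == 0:
--         return dic
--     dic[keys[0]] = values[0]
--     return createDic(keys[1:], values[1:], dic)
-- ===== SOURCE B (Python) =====
-- def treatLine(lineNr, line):
--     vowels = ('a', 'i', 'e', 'o', 'u')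
--     d = {}
--     for w in line.split():
--         v = [c for c in w if c.lower() in vowels]
--         bm = [c for c in w if 'a' <= c.lower() <= 'm' and c.lower() not in vowels]
--         nz = [c for c in w if 'n' <= c.lower() <= 'z' and c.lower() not in vowels]
--         d[w] = (v, bm, nz)
--     return (lineNr, d)
-- ===== Notes on version B (the rewrite author's own statement) =====
-- stated objective: simpler
-- what changed: B builds the dictionary in one direct pass over the words, computing each word's (vowels, a-m consonants, n-z consonants) triple on the spot, instead of A's three recursive whole-corpus passes packed into a tuple, transposed with zip, and fed to a recursive dict builder.
import Mathlib
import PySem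

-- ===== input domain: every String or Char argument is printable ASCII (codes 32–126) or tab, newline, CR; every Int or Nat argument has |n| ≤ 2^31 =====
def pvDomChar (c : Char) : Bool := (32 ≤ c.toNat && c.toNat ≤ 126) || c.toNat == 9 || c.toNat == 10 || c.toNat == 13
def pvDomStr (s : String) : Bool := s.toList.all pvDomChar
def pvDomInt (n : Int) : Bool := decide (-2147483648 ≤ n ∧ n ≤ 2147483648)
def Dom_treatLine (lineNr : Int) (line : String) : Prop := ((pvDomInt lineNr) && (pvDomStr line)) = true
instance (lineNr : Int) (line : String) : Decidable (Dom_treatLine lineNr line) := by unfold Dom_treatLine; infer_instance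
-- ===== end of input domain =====

-- B replaces A's three recursive whole-corpus passes + zip transpose + recursive dict builder
-- by one direct pass over the words (simpler decomposition); return values proved equal on Dom.

-- ===== PORT A =====

-- vowels default argument of the three helpers
def pvVowels : List Char := ['a', 'i', 'e', 'o', 'u']

-- [i for i in word if i.lower() in vowels]  (1-char strings; i.lower() on ASCII = lowerChar)
def crateListVByWord (word : String) : List String :=
  (word.toList.filter (fun c => PySem.Chars.lowerChar c ∈ pvVowels)).map (fun c => String.ofList [c])

-- 'm' >= i.lower() >= 'a' and i.lower() not in vowels  (single-char string comparison = Char comparison)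
def createListbmByWord (word : String) : List String :=
  (word.toList.filter (fun c =>
    PySem.Chars.lowerChar c ≤ 'm' ∧ 'a' ≤ PySem.Chars.lowerChar c ∧ PySem.Chars.lowerChar c ∉ pvVowels)).map
    (fun c => String.ofList [c])

def createListnzByWord (word : String) : List String :=
  (word.toList.filter (fun c =>
    PySem.Chars.lowerChar c ≤ 'z' ∧ 'n' ≤ PySem.Chars.lowerChar c ∧ PySem.Chars.lowerChar c ∉ pvVowels)).map
    (fun c => String.ofList [c])

-- recursion on line[:-1], appending func(line[-1])
def listOfSentence (l : List String) (func : String → List String) : List (List String) :=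
  if h : l = [] then []
  else listOfSentence l.dropLast func ++ [func (l.getLast h)]
termination_by l.length
decreasing_by
  have h1 : l.dropLast.length = l.length - 1 := List.length_dropLast
  have h2 : 0 < l.length := List.length_pos_iff.mpr h
  omega

-- Python zip over the three lists of tup (truncates at the shortest) — exact
def pyZip3 (a b c : List (List String)) : List (List String × List String × List String) :=
  match a, b, c with
  | x :: a, y :: b, z :: c => (x, y, z) :: pyZip3 a b c
  | _, _, _ => []

-- createDic: dic[keys[0]] = values[0]; recurse on tails.  (keys longer than values would be a
-- Python IndexError; unreachable at A's call site where both lists have equal length)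
def createDic (keys : List String) (values : List (List String × List String × List String))
    (dic : PySem.Dict String (List String × List String × List String)) :
    PySem.Dict String (List String × List String × List String) :=
  match keys, values with
  | [], _ => dic
  | k :: ks, v :: vs => createDic ks vs (dic.insert k v)
  | _ :: _, [] => dic

def treatLine (lineNr : Int) (line : String) : Int × (List (String × List String × List String × List String)) :=
  let keys := PySem.Str.split₀ line
  let vowels := listOfSentence keys crateListVByWord
  let consonantbm := listOfSentence keys createListbmByWord
  let consonantnz := listOfSentence keys createListnzByWord
  -- tup = (vowels,) + (consonantbm,) + (consonantnz,); values = list(zip(*tup))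
  let values := pyZip3 vowels consonantbm consonantnz
  let d := createDic keys values PySem.Dict.empty
  (lineNr, d.items)

-- ===== PORT B =====
def treatLine_alt (lineNr : Int) (line : String) : Int × (List (String × List String × List String × List String)) :=
  let d := (PySem.Str.split₀ line).foldl
    (fun d w =>
      let v := (w.toList.filter (fun c => PySem.Chars.lowerChar c ∈ pvVowels)).map (fun c => String.ofList [c])
      let bm := (w.toList.filter (fun c =>
        'a' ≤ PySem.Chars.lowerChar c ∧ PySem.Chars.lowerChar c ≤ 'm' ∧ PySem.Chars.lowerChar c ∉ pvVowels)).map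
        (fun c => String.ofList [c])
      let nz := (w.toList.filter (fun c =>
        'n' ≤ PySem.Chars.lowerChar c ∧ PySem.Chars.lowerChar c ≤ 'z' ∧ PySem.Chars.lowerChar c ∉ pvVowels)).map
        (fun c => String.ofList [c])
      d.insert w (v, bm, nz))
    PySem.Dict.empty
  (lineNr, d.items)

-- ===== PRECONDITION & SPEC =====
def Spec_treatLine (lineNr : Int) (line : String) (out : Int × (List (String × List String × List String × List String))) : Prop := out = treatLine_alt lineNr line
instance (lineNr : Int) (line : String) (out : Int × (List (String × List String × List String × List String))) : Decidable (Spec_treatLine lineNr line out) := by unfold Spec_treatLine; infer_instance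

-- ===== CLAIM (what is proved, stated in full; the proofs are below) =====
def Claim_equal_treatLine : Prop := ∀ (lineNr : Int) (line : String), Dom_treatLine lineNr line → Spec_treatLine lineNr line (treatLine lineNr line)

-- ===== LEMMAS AND PROOFS =====

theorem listOfSentence_eq_map (l : List String) (f : String → List String) :
    listOfSentence l f = l.map f := by
  induction l using List.reverseRecOn with
  | nil => simp [listOfSentence]
  | append_singleton l a ih =>
      rw [listOfSentence]
      simp [ih]

theorem pyZip3_map {κ : Type} (ks : List κ) (f g h : κ → List String) :
    pyZip3 (ks.map f) (ks.map g) (ks.map h) = ks.map (fun w => (f w, g w, h w)) := by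
  induction ks with
  | nil => rfl
  | cons k ks ih => simp [pyZip3, ih]

theorem createDic_map (ks : List String) (t : String → List String × List String × List String)
    (d : PySem.Dict String (List String × List String × List String)) :
    createDic ks (ks.map t) d = ks.foldl (fun d w => d.insert w (t w)) d := by
  induction ks generalizing d with
  | nil => rfl
  | cons k ks ih => simp [createDic, List.foldl, ih]

-- ===== VERDICT (by name: the statement is the Claim_ definition above) =====
theorem treatLine_spec : Claim_equal_treatLine := by
  intro lineNr line _
  show treatLine lineNr line = treatLine_alt lineNr line
  simp only [treatLine, treatLine_alt, listOfSentence_eq_map, pyZip3_map, createDic_map,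
    crateListVByWord, createListbmByWord, createListnzByWord]
  have hbm : ∀ c : Char,
      (decide (PySem.Chars.lowerChar c ≤ 'm' ∧ 'a' ≤ PySem.Chars.lowerChar c ∧
        PySem.Chars.lowerChar c ∉ pvVowels)) =
      (decide ('a' ≤ PySem.Chars.lowerChar c ∧ PySem.Chars.lowerChar c ≤ 'm' ∧
        PySem.Chars.lowerChar c ∉ pvVowels)) := by
    intro c; exact decide_eq_decide.mpr and_left_comm
  have hnz : ∀ c : Char,
      (decide (PySem.Chars.lowerChar c ≤ 'z' ∧ 'n' ≤ PySem.Chars.lowerChar c ∧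
        PySem.Chars.lowerChar c ∉ pvVowels)) =
      (decide ('n' ≤ PySem.Chars.lowerChar c ∧ PySem.Chars.lowerChar c ≤ 'z' ∧
        PySem.Chars.lowerChar c ∉ pvVowels)) := by
    intro c; exact decide_eq_decide.mpr and_left_comm
  simp only [hbm, hnz]
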